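-- pv_equiv track=rewrite | github.com/dlukes/kontext | lib/conclib/calc/__init__.py | _contains_shuffle_seq
-- ===== SOURCE A (Python) =====
-- from typing import Tuple, Optional
--
-- def _contains_shuffle_seq(q_ops: Tuple[str, ...]) -> bool:
--     """
--     Tests whether the provided query sequence contains a subsequence
--     of 'shuffle' operation (e.g. on ['foo', 'bar', 'f', 'f', 'something'] returns True)
--     """
--     prev_shuffle = False
--     for item in q_ops:
--         if item == 'f':
--             if prev_shuffle:
--                 return True
--             else:
--                 prev_shuffle = True
--         else:
--             prev_shuffle = False
--     return False
-- ===== SOURCE B (Python) =====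
-- def _rle(q_ops):
--     """Run-length encode the sequence into [(token, run_length), ...]."""
--     runs = []
--     for item in q_ops:
--         if runs and runs[-1][0] == item:
--             runs[-1] = (item, runs[-1][1] + 1)
--         else:
--             runs.append((item, 1))
--     return runs
--
--
-- def _contains_shuffle_seq(q_ops):
--     """True iff some maximal run of 'f' has length >= 2."""
--     return any(tok == 'f' and n >= 2 for tok, n in _rle(q_ops))
-- ===== Notes on version B (the rewrite author's own statement) =====
-- stated objective: alternative
-- what changed: Replaces the carried prev_shuffle flag and early return with a two-stage computation: first build a run-length encoding of the whole sequence, then test whether any maximal run of 'f' has length >= 2.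
import Mathlib
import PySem

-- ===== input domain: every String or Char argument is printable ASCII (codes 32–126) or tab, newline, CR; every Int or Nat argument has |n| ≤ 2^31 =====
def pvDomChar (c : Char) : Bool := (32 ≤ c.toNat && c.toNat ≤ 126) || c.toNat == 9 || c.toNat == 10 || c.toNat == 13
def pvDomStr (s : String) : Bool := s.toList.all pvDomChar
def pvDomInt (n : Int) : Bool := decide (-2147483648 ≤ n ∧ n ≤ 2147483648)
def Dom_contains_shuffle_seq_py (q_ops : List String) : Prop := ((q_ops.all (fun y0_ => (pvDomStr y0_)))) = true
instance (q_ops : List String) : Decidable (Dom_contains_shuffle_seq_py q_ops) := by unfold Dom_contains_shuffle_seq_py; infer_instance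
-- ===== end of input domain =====

-- B replaces A's carried flag + early return by a run-length encoding pass followed by a scan for an 'f'-run of length ≥ 2 (alternative decomposition; same cost).


-- ===== PORT A =====
def pvShuffleLoop : List String → Bool → Bool
  | [], _ => false
  | item :: rest, prev_shuffle =>
    if item == "f" then
      if prev_shuffle then true else pvShuffleLoop rest true
    else
      pvShuffleLoop rest false

def contains_shuffle_seq_py (q_ops : List String) : Bool :=
  pvShuffleLoop q_ops false

-- ===== PORT B =====
-- one loop iteration of _rle: extend the last run or start a new one
def pvRleStep (runs : List (String × Nat)) (item : String) : List (String × Nat) :=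
  match runs.getLast? with
  | some last =>
      if last.1 == item then runs.dropLast ++ [(item, last.2 + 1)]
      else runs ++ [(item, 1)]
  | none => runs ++ [(item, 1)]

def pvRle (q_ops : List String) : List (String × Nat) :=
  q_ops.foldl pvRleStep []

def contains_shuffle_seq_py_alt (q_ops : List String) : Bool :=
  (pvRle q_ops).any (fun r => r.1 == "f" && decide (2 ≤ r.2))

-- ===== PRECONDITION & SPEC =====
def Spec_contains_shuffle_seq_py (q_ops : List String) (out : Bool) : Prop := out = contains_shuffle_seq_py_alt q_ops
instance (q_ops : List String) (out : Bool) : Decidable (Spec_contains_shuffle_seq_py q_ops out) := by unfold Spec_contains_shuffle_seq_py; infer_instance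

-- ===== CLAIM (what is proved, stated in full; the proofs are below) =====
def Claim_equal_contains_shuffle_seq_py : Prop := ∀ (q_ops : List String), Dom_contains_shuffle_seq_py q_ops → Spec_contains_shuffle_seq_py q_ops (contains_shuffle_seq_py q_ops)

-- ===== LEMMAS AND PROOFS =====

-- the run predicate tested by B
def pvRunP (r : String × Nat) : Bool := r.1 == "f" && decide (2 ≤ r.2)

-- whether the last run (if any) is an 'f' run
def pvLastIsF (runs : List (String × Nat)) : Bool := (runs.getLast?.map Prod.fst) == some "f"

-- every run length in the accumulator is positive
def pvPos (runs : List (String × Nat)) : Prop := ∀ r ∈ runs, 1 ≤ r.2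

theorem pvPos_step (runs : List (String × Nat)) (item : String) (h : pvPos runs) :
    pvPos (pvRleStep runs item) := by
  induction runs using List.reverseRecOn with
  | nil => intro r hr; simp [pvRleStep] at hr; simp [hr]
  | append_singleton rs l _ =>
    intro r hr
    simp only [pvRleStep, List.getLast?_concat, List.dropLast_concat] at hr
    split_ifs at hr with hl
    · rcases List.mem_append.mp hr with h1 | h1
      · exact h r (List.mem_append.mpr (Or.inl h1))
      · simp at h1; simp [h1]
    · rcases List.mem_append.mp hr with h1 | h1
      · exact h r h1
      · simp at h1; simp [h1]

theorem pvAny_step (runs : List (String × Nat)) (item : String) (h : pvPos runs) :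
    (pvRleStep runs item).any pvRunP
      = (runs.any pvRunP || (item == "f" && pvLastIsF runs)) := by
  induction runs using List.reverseRecOn with
  | nil => simp [pvRleStep, pvLastIsF, pvRunP]
  | append_singleton rs l _ =>
    have hpos : 1 ≤ l.2 := h l (List.mem_append.mpr (Or.inr (by simp)))
    simp only [pvRleStep, List.getLast?_concat, List.dropLast_concat, pvLastIsF,
      Option.map_some]
    split_ifs with hl
    · have hle : l.1 = item := by simpa using hl
      by_cases hf : item = "f"
      · subst hf
        simp [pvRunP, hle, show 2 ≤ l.2 + 1 by omega]
      · have : (item == "f") = false := by simp [hf]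
        simp [pvRunP, this, hle]
    · have hne : ¬ l.1 = item := by simpa using hl
      by_cases hf : item = "f"
      · subst hf
        have : (l.1 == "f") = false := by simp [hne]
        simp [pvRunP, this]
      · have h1 : (item == "f") = false := by simp [hf]
        simp [pvRunP, h1]

theorem pvLastIsF_step (runs : List (String × Nat)) (item : String) :
    pvLastIsF (pvRleStep runs item) = (item == "f") := by
  induction runs using List.reverseRecOn with
  | nil => simp [pvRleStep, pvLastIsF]
  | append_singleton rs l _ =>
    simp only [pvRleStep, List.getLast?_concat, List.dropLast_concat]
    split_ifs <;> simp [pvLastIsF]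

theorem pvFoldl_any_true (xs : List String) (runs : List (String × Nat))
    (hpos : pvPos runs) (h : runs.any pvRunP = true) :
    (xs.foldl pvRleStep runs).any pvRunP = true := by
  induction xs generalizing runs with
  | nil => simpa using h
  | cons x rest ih =>
    simp only [List.foldl_cons]
    exact ih _ (pvPos_step runs x hpos) (by rw [pvAny_step runs x hpos, h]; simp)

theorem pvMain (xs : List String) (runs : List (String × Nat)) (prev : Bool)
    (hpos : pvPos runs) (hlast : pvLastIsF runs = prev)
    (hany : runs.any pvRunP = false) :
    pvShuffleLoop xs prev = (xs.foldl pvRleStep runs).any pvRunP := by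
  induction xs generalizing runs prev with
  | nil => simpa [pvShuffleLoop] using hany.symm
  | cons x rest ih =>
    simp only [List.foldl_cons]
    have hpos' := pvPos_step runs x hpos
    have hstep := pvAny_step runs x hpos
    have hlast' := pvLastIsF_step runs x
    by_cases hf : x = "f"
    · subst hf
      cases prev with
      | true =>
        have : (pvRleStep runs "f").any pvRunP = true := by
          rw [hstep, hany, hlast]; simp
        rw [pvFoldl_any_true rest _ hpos' this]
        simp [pvShuffleLoop]
      | false =>
        have hany' : (pvRleStep runs "f").any pvRunP = false := by
          rw [hstep, hany, hlast]; simp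
        have := ih (pvRleStep runs "f") true hpos' (by rw [hlast']; simp) hany'
        simpa [pvShuffleLoop] using this
    · have hx : (x == "f") = false := by simp [hf]
      have hany' : (pvRleStep runs x).any pvRunP = false := by
        rw [hstep, hany, hx]; simp
      have := ih (pvRleStep runs x) false hpos' (by rw [hlast', hx]) hany'
      simpa [pvShuffleLoop, hx] using this

-- ===== VERDICT (by name: the statement is the Claim_ definition above) =====
theorem contains_shuffle_seq_py_spec : Claim_equal_contains_shuffle_seq_py := by
  intro q_ops _
  unfold Spec_contains_shuffle_seq_py contains_shuffle_seq_py contains_shuffle_seq_py_alt pvRle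
  have := pvMain q_ops [] false (by intro r hr; simp at hr) (by simp [pvLastIsF]) (by simp)
  simpa [pvRunP] using this
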